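-- pv_equiv track=rewrite | github.com/kompleksanda/gutenbergs-code | guth/New Folder/samp.py | generate_diff_pron
-- ===== SOURCE A (Python) =====
-- def flatten(listt, level = -1):
-- 	new_list = []
-- 	if level == 0: return listt
-- 	elif level > 0:
-- 		new_list = listt
-- 		for i in range(level):
-- 			if all(isinstance(v, list) for v in new_list):
-- 				new_list = []
-- 				for j in listt: new_list += j
-- 				listt = new_list
-- 				if i == level - 1: return new_list
-- 			else: return new_list
-- 	elif level < 0:
-- 		for i in listt:
-- 			if isinstance(i, list): new_list += flatten(i)
-- 			else: new_list.append(i)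
-- 		return new_list
--
-- def generate_diff_pron(orig_pron, include=False):
-- 	ret_list = []
-- 	pron_len = len(orig_pron)
-- 	for i in range(pron_len):
-- 		if i == 0:
-- 			if include:
-- 				for j in range(pron_len): ret_list.append(flatten(orig_pron[0:j+1])+[j+1])
-- 			else:
-- 				for j in range(pron_len - 1): ret_list.append(flatten(orig_pron[0:j+1])+[j+1])
-- 		else:
-- 			for j in range(pron_len - i): ret_list.append(flatten(orig_pron[i:i+j+1])+[j+1])
-- 	return ret_list
-- ===== SOURCE B (Python) =====
-- def generate_diff_pron(orig_pron, include=False):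
--     def _flat(e):
--         if isinstance(e, list):
--             out = []
--             for x in e:
--                 out.extend(_flat(x))
--             return out
--         return [e]
--     res = []
--     n = len(orig_pron)
--     for i in range(n):
--         limit = (n - 1) if (i == 0 and not include) else (n - i)
--         acc = []
--         for j in range(limit):
--             acc = acc + _flat(orig_pron[i + j])
--             res.append(acc + [j + 1])
--     return res
-- ===== Notes on version B (the rewrite author's own statement) =====
-- stated objective: faster
-- what changed: B keeps one running flattened accumulator per start index and extends it element by element, instead of re-slicing and fully re-flattening every growing prefix as A does.
import Mathlib
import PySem

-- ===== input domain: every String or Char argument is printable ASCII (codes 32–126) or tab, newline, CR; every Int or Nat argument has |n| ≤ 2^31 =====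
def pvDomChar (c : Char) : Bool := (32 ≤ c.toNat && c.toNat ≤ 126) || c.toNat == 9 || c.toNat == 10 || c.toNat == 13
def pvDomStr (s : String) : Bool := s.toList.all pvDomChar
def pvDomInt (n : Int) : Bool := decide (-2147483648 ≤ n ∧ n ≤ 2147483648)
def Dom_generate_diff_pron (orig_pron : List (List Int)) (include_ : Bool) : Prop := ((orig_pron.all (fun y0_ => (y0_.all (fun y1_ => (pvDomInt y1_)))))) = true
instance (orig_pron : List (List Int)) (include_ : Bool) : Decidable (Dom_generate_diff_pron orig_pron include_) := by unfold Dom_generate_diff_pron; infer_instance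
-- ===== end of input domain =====

-- B replaces A's repeated slice-and-reflatten of growing prefixes with one incremental
-- flattened accumulator per start index (objective: faster at large sizes).

-- ===== PORT A =====
-- flatten with level = -1 on a list of Int (the recursive call): appends each element
def pyFlattenInt (listt : List Int) : List Int :=
  listt.foldl (fun new_list i => new_list ++ [i]) []
-- flatten with level = -1 on a list of lists of Int: new_list += flatten(i)
def pyFlatten (listt : List (List Int)) : List Int :=
  listt.foldl (fun new_list i => new_list ++ pyFlattenInt i) []

def generate_diff_pron (orig_pron : List (List Int)) (include_ : Bool) : List (List Int) :=
  let pron_len := orig_pron.length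
  (List.range pron_len).foldl (fun ret_list (i : Nat) =>
    if i == 0 then
      if include_ then
        (List.range pron_len).foldl (fun r (j : Nat) =>
          r ++ [pyFlatten (PySem.List.slice orig_pron (some 0) (some ((j : Int) + 1))) ++ [(j : Int) + 1]]) ret_list
      else
        (List.range (pron_len - 1)).foldl (fun r (j : Nat) =>
          r ++ [pyFlatten (PySem.List.slice orig_pron (some 0) (some ((j : Int) + 1))) ++ [(j : Int) + 1]]) ret_list
    else
      (List.range (pron_len - i)).foldl (fun r (j : Nat) =>
        r ++ [pyFlatten (PySem.List.slice orig_pron (some (i : Int)) (some ((i : Int) + (j : Int) + 1))) ++ [(j : Int) + 1]]) ret_list) []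

-- ===== PORT B =====
-- _flat on an element, which here is a List Int of atoms: extends by [x] for each x
def flatB (e : List Int) : List Int :=
  e.foldl (fun out x => out ++ [x]) []

def generate_diff_pron_alt (orig_pron : List (List Int)) (include_ : Bool) : List (List Int) :=
  let n := orig_pron.length
  (List.range n).foldl (fun res (i : Nat) =>
    let limit := if i == 0 && !include_ then n - 1 else n - i
    -- index i + j is always in range in the Python; Nat getD is exact here
    ((List.range limit).foldl (fun (p : List (List Int) × List Int) (j : Nat) =>
        let acc := p.2 ++ flatB (orig_pron.getD (i + j) [])
        (p.1 ++ [acc ++ [(j : Int) + 1]], acc)) (res, ([] : List Int))).1) []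

-- ===== PRECONDITION & SPEC =====
def Spec_generate_diff_pron (orig_pron : List (List Int)) (include_ : Bool) (out : List (List Int)) : Prop := out = generate_diff_pron_alt orig_pron include_
instance (orig_pron : List (List Int)) (include_ : Bool) (out : List (List Int)) : Decidable (Spec_generate_diff_pron orig_pron include_ out) := by unfold Spec_generate_diff_pron; infer_instance

-- ===== CLAIM (what is proved, stated in full; the proofs are below) =====
def Claim_equal_generate_diff_pron : Prop := ∀ (orig_pron : List (List Int)) (include_ : Bool), Dom_generate_diff_pron orig_pron include_ → Spec_generate_diff_pron orig_pron include_ (generate_diff_pron orig_pron include_)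

-- ===== LEMMAS AND PROOFS =====

theorem foldl_app_singleton (xs : List Int) (a : List Int) :
    xs.foldl (fun out x => out ++ [x]) a = a ++ xs := by
  induction xs generalizing a with
  | nil => simp
  | cons x xs ih => rw [List.foldl_cons, ih]; simp

theorem flatB_id (e : List Int) : flatB e = e := by
  rw [flatB, foldl_app_singleton, List.nil_append]

theorem pyFlattenInt_id (e : List Int) : pyFlattenInt e = e := by
  rw [pyFlattenInt, foldl_app_singleton, List.nil_append]

theorem foldl_app (xs : List (List Int)) (a : List Int) :
    xs.foldl (fun out x => out ++ x) a = a ++ xs.flatten := by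
  induction xs generalizing a with
  | nil => simp
  | cons x xs ih => rw [List.foldl_cons, ih]; simp

theorem pyFlatten_eq (l : List (List Int)) : pyFlatten l = l.flatten := by
  rw [pyFlatten]
  have : (fun (new_list : List Int) (i : List Int) => new_list ++ pyFlattenInt i)
       = (fun (out : List Int) (x : List Int) => out ++ x) := by
    funext a b; rw [pyFlattenInt_id]
  rw [this, foldl_app, List.nil_append]

-- reference form of one emitted row
def rowR (l : List (List Int)) (i j : Nat) : List Int :=
  ((l.drop i).take (j + 1)).flatten ++ [(j : Int) + 1]

theorem Ainner (l : List (List Int)) (i m : Nat) (ret : List (List Int)) (f : Nat → List Int)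
    (hf : ∀ j, f j = rowR l i j) :
    (List.range m).foldl (fun r (j : Nat) => r ++ [f j]) ret
      = ret ++ (List.range m).map (rowR l i) := by
  induction m generalizing ret with
  | zero => simp
  | succ m ih =>
    rw [List.range_succ, List.foldl_append, ih, List.foldl_cons, List.foldl_nil, hf,
        List.map_append, List.map_singleton, List.append_assoc]

theorem take_succ_flatten (l : List (List Int)) (i j : Nat) :
    ((l.drop i).take (j + 1)).flatten
      = ((l.drop i).take j).flatten ++ l.getD (i + j) [] := by
  by_cases h : j < (l.drop i).length
  · have hb : i + j < l.length := by
      have := List.length_drop (l := l) (i := i); omega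
    rw [List.take_add_one]
    have h1 : (l.drop i)[j]?.toList = [l.getD (i + j) []] := by
      rw [List.getElem?_drop, List.getElem?_eq_getElem hb]
      simp [List.getD, List.getElem?_eq_getElem hb]
    rw [h1]
    simp
  · rw [Nat.not_lt] at h
    have hd : l.getD (i + j) [] = [] := by
      have : l.length ≤ i + j := by
        have := List.length_drop (l := l) (i := i)
        omega
      simp [List.getD, List.getElem?_eq_none_iff.mpr this]
    rw [List.take_of_length_le h, List.take_of_length_le (by omega), hd, List.append_nil]

theorem Binner (l : List (List Int)) (i m : Nat) (ret : List (List Int)) :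
    (List.range m).foldl (fun (p : List (List Int) × List Int) (j : Nat) =>
        let acc := p.2 ++ flatB (l.getD (i + j) [])
        (p.1 ++ [acc ++ [(j : Int) + 1]], acc)) (ret, ([] : List Int))
      = (ret ++ (List.range m).map (rowR l i), ((l.drop i).take m).flatten) := by
  induction m generalizing ret with
  | zero => simp
  | succ m ih =>
    rw [List.range_succ, List.foldl_append, ih, List.foldl_cons, List.foldl_nil]
    simp only [flatB_id, List.map_append, List.map_singleton]
    rw [take_succ_flatten]
    refine Prod.ext ?_ ?_
    · simp [rowR, take_succ_flatten, List.append_assoc]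
    · rfl

theorem slice_row0 (l : List (List Int)) (j : Nat) :
    pyFlatten (PySem.List.slice l (some 0) (some ((j : Int) + 1))) ++ [(j : Int) + 1]
      = rowR l 0 j := by
  have h1 : ((j : Int) + 1) = ((j + 1 : Nat) : Int) := by push_cast; ring
  have h0 : (0 : Int) = ((0 : Nat) : Int) := rfl
  rw [h1, h0, PySem.List.slice_natCast, pyFlatten_eq]
  simp [rowR]

theorem slice_rowi (l : List (List Int)) (i j : Nat) :
    pyFlatten (PySem.List.slice l (some (i : Int)) (some ((i : Int) + (j : Int) + 1))) ++ [(j : Int) + 1]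
      = rowR l i j := by
  have h1 : ((i : Int) + (j : Int) + 1) = ((i + (j + 1) : Nat) : Int) := by push_cast; ring
  rw [h1, PySem.List.slice_natCast, pyFlatten_eq]
  have h2 : i + (j + 1) - i = j + 1 := by omega
  rw [h2, rowR]

theorem body_eq (l : List (List Int)) (include_ : Bool) (ret : List (List Int)) (i : Nat) :
    (if i == 0 then
      if include_ then
        (List.range l.length).foldl (fun r (j : Nat) =>
          r ++ [pyFlatten (PySem.List.slice l (some 0) (some ((j : Int) + 1))) ++ [(j : Int) + 1]]) ret
      else
        (List.range (l.length - 1)).foldl (fun r (j : Nat) =>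
          r ++ [pyFlatten (PySem.List.slice l (some 0) (some ((j : Int) + 1))) ++ [(j : Int) + 1]]) ret
    else
      (List.range (l.length - i)).foldl (fun r (j : Nat) =>
        r ++ [pyFlatten (PySem.List.slice l (some (i : Int)) (some ((i : Int) + (j : Int) + 1))) ++ [(j : Int) + 1]]) ret)
    = ((List.range (if i == 0 && !include_ then l.length - 1 else l.length - i)).foldl
        (fun (p : List (List Int) × List Int) (j : Nat) =>
          let acc := p.2 ++ flatB (l.getD (i + j) [])
          (p.1 ++ [acc ++ [(j : Int) + 1]], acc)) (ret, ([] : List Int))).1 := by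
  rw [Binner]
  by_cases hi : i = 0
  · subst hi
    simp only [beq_self_eq_true, Bool.true_and, if_true, Nat.sub_zero]
    cases include_ with
    | true =>
      simp only [Bool.not_true, Bool.false_eq_true, if_false]
      exact Ainner l 0 l.length ret _ (fun j => slice_row0 l j)
    | false =>
      simp only [Bool.not_false, if_true, Bool.false_eq_true, if_false]
      exact Ainner l 0 (l.length - 1) ret _ (fun j => slice_row0 l j)
  · have hb : (i == 0) = false := by simp [hi]
    simp only [hb, Bool.false_and, Bool.false_eq_true, if_false]
    exact Ainner l i (l.length - i) ret _ (fun j => slice_rowi l i j)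

-- ===== VERDICT (by name: the statement is the Claim_ definition above) =====
theorem generate_diff_pron_spec : Claim_equal_generate_diff_pron := by
  intro l include_ _
  unfold Spec_generate_diff_pron generate_diff_pron generate_diff_pron_alt
  exact PySem.List.foldl_congr_mem _ _ _ _ (fun ret i _ => body_eq l include_ ret i)
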